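-- pv_equiv track=rewrite | github.com/RabbiJoshy/Fluency | Artists/tools/scan_duplicates.py | find_consecutive_runs
-- ===== SOURCE A (Python) =====
-- def find_consecutive_runs(shared_indices_a, shared_indices_b):
--     """Find consecutive runs of shared lines.
--
--     Given parallel arrays of indices in song A and song B where lines match,
--     find maximal runs where BOTH indices are consecutive.
--     Returns list of (start_a, start_b, length) tuples.
--     """
--     if not shared_indices_a:
--         return []
--
--     # Sort by position in song A
--     pairs = sorted(zip(shared_indices_a, shared_indices_b))
--     runs = []
--     run_start_a, run_start_b = pairs[0]
--     run_len = 1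
--
--     for i in range(1, len(pairs)):
--         a, b = pairs[i]
--         prev_a, prev_b = pairs[i - 1]
--         if a == prev_a + 1 and b == prev_b + 1:
--             run_len += 1
--         else:
--             runs.append((run_start_a, run_start_b, run_len))
--             run_start_a, run_start_b = a, b
--             run_len = 1
--     runs.append((run_start_a, run_start_b, run_len))
--     return runs
-- ===== SOURCE B (Python) =====
-- def find_consecutive_runs(shared_indices_a, shared_indices_b):
--     """Offset-key grouping in staged passes: within a maximal consecutive run
--     the key (a - i, b - i) over the sorted pair list is constant, and it changes
--     at every break; so run starts are the positions where the key changes, and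
--     run lengths are differences of consecutive start positions."""
--     pairs = sorted(zip(shared_indices_a, shared_indices_b))
--     keys = [(a - i, b - i) for i, (a, b) in enumerate(pairs)]
--     starts = [i for i in range(len(pairs)) if i == 0 or keys[i] != keys[i - 1]]
--     ends = starts[1:] + [len(pairs)]
--     return [(pairs[s][0], pairs[s][1], e - s) for s, e in zip(starts, ends)]
-- ===== Notes on version B (the rewrite author's own statement) =====
-- stated objective: alternative
-- what changed: Replaces A's single stateful scan (run accumulator comparing each pair to its predecessor) by staged passes built on the constant-offset-key idea: compute keys (a-i, b-i) over the enumerated sorted pairs, take run starts as the positions where the key changes, and emit each run as (pairs[s], next_start - s) by zipping starts with shifted starts.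
import Mathlib
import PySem

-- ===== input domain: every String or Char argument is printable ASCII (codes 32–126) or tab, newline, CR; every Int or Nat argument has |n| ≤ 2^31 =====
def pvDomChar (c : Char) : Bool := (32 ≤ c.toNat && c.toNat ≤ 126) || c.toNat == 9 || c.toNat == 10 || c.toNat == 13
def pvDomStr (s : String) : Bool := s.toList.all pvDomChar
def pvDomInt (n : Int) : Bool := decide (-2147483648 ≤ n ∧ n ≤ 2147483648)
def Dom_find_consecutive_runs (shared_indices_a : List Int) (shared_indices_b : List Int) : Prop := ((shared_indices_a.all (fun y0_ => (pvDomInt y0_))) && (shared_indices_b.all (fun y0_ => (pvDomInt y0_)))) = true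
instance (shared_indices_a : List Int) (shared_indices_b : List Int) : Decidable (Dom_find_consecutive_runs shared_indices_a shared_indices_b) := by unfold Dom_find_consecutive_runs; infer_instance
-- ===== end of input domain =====

-- B replaces A's stateful predecessor-comparing scan by staged passes on the
-- offset key (a-i, b-i): run starts are the key-change positions, lengths are
-- differences of consecutive starts (objective: alternative).

-- ===== PORT A =====
-- literal port of A: sort, then for i in range(1, len(pairs)) compare pairs[i] with pairs[i-1],
-- carrying (runs, run_start_a, run_start_b, run_len) as the fold state
def find_consecutive_runs (shared_indices_a : List Int) (shared_indices_b : List Int) : List (Int × Int × Int) :=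
  if shared_indices_a = [] then []
  else
    let pairs := PySem.List.sorted2 (shared_indices_a.zip shared_indices_b) Prod.fst Prod.snd
    match PySem.List.pyGet? pairs 0 with
    | none => []  -- Python raises IndexError here (pairs[0] on empty zip); excluded by Pre_
    | some p0 =>
      let st := (PySem.List.pyRange 1 (pairs.length : Int) 1).foldl
        (fun (st : List (Int × Int × Int) × Int × Int × Int) i =>
          let cur := PySem.List.pyGetD pairs i (0, 0)
          let prev := PySem.List.pyGetD pairs (i - 1) (0, 0)
          if cur.1 = prev.1 + 1 ∧ cur.2 = prev.2 + 1 then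
            (st.1, st.2.1, st.2.2.1, st.2.2.2 + 1)
          else
            (st.1 ++ [(st.2.1, st.2.2.1, st.2.2.2)], cur.1, cur.2, 1))
        ([], p0.1, p0.2, 1)
      st.1 ++ [(st.2.1, st.2.2.1, st.2.2.2)]

-- ===== PORT B =====
-- literal port of Source B: sort; keys = [(a-i, b-i) for i,(a,b) in enumerate(pairs)];
-- starts = [i for i in range(len(pairs)) if i == 0 or keys[i] != keys[i-1]];
-- ends = starts[1:] + [len(pairs)]; emit (pairs[s][0], pairs[s][1], e - s)
def find_consecutive_runs_alt (shared_indices_a : List Int) (shared_indices_b : List Int) : List (Int × Int × Int) :=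
  let pairs := PySem.List.sorted2 (shared_indices_a.zip shared_indices_b) Prod.fst Prod.snd
  let keys : List (Int × Int) :=
    (PySem.List.enumerate pairs).map (fun iab => (iab.2.1 - iab.1, iab.2.2 - iab.1))
  let starts := (PySem.List.pyRange 0 (pairs.length : Int) 1).filter
    (fun i => i == 0 || PySem.List.pyGetD keys i (0, 0) != PySem.List.pyGetD keys (i - 1) (0, 0))
  let ends := starts.drop 1 ++ [(pairs.length : Int)]
  (starts.zip ends).map (fun se =>
    let p := PySem.List.pyGetD pairs se.1 (0, 0)
    (p.1, p.2, se.2 - se.1))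

-- ===== PRECONDITION & SPEC =====
-- Pre_ excludes exactly the inputs where A raises IndexError (pairs[0] on the empty zip):
-- shared_indices_a nonempty while shared_indices_b is empty.
def Pre_find_consecutive_runs (shared_indices_a : List Int) (shared_indices_b : List Int) : Prop :=
  shared_indices_a = [] ∨ shared_indices_b ≠ []
instance (shared_indices_a : List Int) (shared_indices_b : List Int) : Decidable (Pre_find_consecutive_runs shared_indices_a shared_indices_b) := by unfold Pre_find_consecutive_runs; infer_instance

def pvWitness_find_consecutive_runs : List Int × List Int := ([1, 2, 5], [3, 4, 9])

def Spec_find_consecutive_runs (shared_indices_a : List Int) (shared_indices_b : List Int) (out : List (Int × Int × Int)) : Prop := out = find_consecutive_runs_alt shared_indices_a shared_indices_b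
instance (shared_indices_a : List Int) (shared_indices_b : List Int) (out : List (Int × Int × Int)) : Decidable (Spec_find_consecutive_runs shared_indices_a shared_indices_b out) := by unfold Spec_find_consecutive_runs; infer_instance

-- ===== CLAIM (what is proved, stated in full; the proofs are below) =====
def Claim_equal_find_consecutive_runs : Prop := ∀ (shared_indices_a : List Int) (shared_indices_b : List Int), Dom_find_consecutive_runs shared_indices_a shared_indices_b → Pre_find_consecutive_runs shared_indices_a shared_indices_b → Spec_find_consecutive_runs shared_indices_a shared_indices_b (find_consecutive_runs shared_indices_a shared_indices_b)


-- ===== LEMMAS AND PROOFS =====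

-- ---- common normal form: peel one maximal run at a time ----
-- inner scan: counts k onward while pairs[i+k] == (x+k, y+k); returns (k, untouched suffix)
def pvScan (x y : Int) : Int → List (Int × Int) → Int × List (Int × Int)
  | k, [] => (k, [])
  | k, p :: rest => if p = (x + k, y + k) then pvScan x y (k + 1) rest else (k, p :: rest)

-- outer loop: peel one maximal run at a time (fuel = length always suffices)
def pvRuns : Nat → List (Int × Int) → List (Int × Int × Int)
  | _, [] => []
  | 0, _ :: _ => []
  | fuel + 1, (x, y) :: rest =>
      let s := pvScan x y 1 rest
      (x, y, s.1) :: pvRuns fuel s.2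

theorem pvScan_spec : ∀ (rest : List (Int × Int)) (x y k : Int),
    ∃ m : Nat, m ≤ rest.length ∧ pvScan x y k rest = (k + (m : Int), rest.drop m) := by
  intro rest
  induction rest with
  | nil => intro x y k; exact ⟨0, by simp [pvScan]⟩
  | cons q r ih =>
    intro x y k
    by_cases hq : q = (x + k, y + k)
    · obtain ⟨m, hm, he⟩ := ih x y (k + 1)
      refine ⟨m + 1, by simpa using Nat.succ_le_succ hm, ?_⟩
      simp only [pvScan, if_pos hq, he, List.drop_succ_cons]
      congr 1
      push_cast; ring
    · exact ⟨0, by simp, by simp [pvScan, if_neg hq]⟩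

theorem pvRuns_fuel : ∀ (f1 : Nat) (xs : List (Int × Int)) (f2 : Nat),
    xs.length ≤ f1 → xs.length ≤ f2 → pvRuns f1 xs = pvRuns f2 xs := by
  intro f1
  induction f1 with
  | zero =>
    intro xs f2 h1 _
    have : xs = [] := List.eq_nil_of_length_eq_zero (Nat.le_zero.mp h1)
    subst this; cases f2 <;> simp [pvRuns]
  | succ f ih =>
    intro xs f2 h1 h2
    cases xs with
    | nil => cases f2 <;> simp [pvRuns]
    | cons p rest =>
      obtain ⟨x, y⟩ := p
      cases f2 with
      | zero => simp at h2
      | succ g =>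
        simp only [pvRuns]
        obtain ⟨m, hm, he⟩ := pvScan_spec rest x y 1
        have hlen : (pvScan x y 1 rest).2.length ≤ rest.length := by
          rw [he]; simp
        simp only [List.length_cons] at h1 h2
        rw [ih (pvScan x y 1 rest).2 g (le_trans hlen (by omega)) (le_trans hlen (by omega))]

-- ---- A-side: the indexed fold is the adjacent-pair fold, which peels runs ----
def pvStepA (st : List (Int × Int × Int) × Int × Int × Int) (prev cur : Int × Int) : List (Int × Int × Int) × Int × Int × Int :=
  if cur.1 = prev.1 + 1 ∧ cur.2 = prev.2 + 1 then
    (st.1, st.2.1, st.2.2.1, st.2.2.2 + 1)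
  else
    (st.1 ++ [(st.2.1, st.2.2.1, st.2.2.2)], cur.1, cur.2, 1)

theorem foldl_idx {β : Type} (g : β → (Int × Int) → (Int × Int) → β) (xs : List (Int × Int)) :
    ∀ (n k : Nat) (init : β), xs.length ≤ k + n →
    (PySem.List.pyRange ((k : Int) + 1) (xs.length : Int) 1).foldl
        (fun st i => g st (PySem.List.pyGetD xs (i - 1) (0, 0)) (PySem.List.pyGetD xs i (0, 0))) init
      = ((xs.drop k).zip (xs.drop (k + 1))).foldl (fun st pq => g st pq.1 pq.2) init := by
  intro n
  induction n with
  | zero =>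
    intro k init h
    have h1 : (xs.length : Int) ≤ (k : Int) + 1 := by exact_mod_cast Nat.le_succ_of_le h
    rw [PySem.List.pyRange_one_eq_nil h1]
    have hd : xs.drop (k + 1) = [] := List.drop_eq_nil_of_le (by omega)
    simp [hd]
  | succ n ih =>
    intro k init h
    by_cases hk : k + 1 < xs.length
    · have hlt : ((k : Int) + 1) < (xs.length : Int) := by exact_mod_cast hk
      rw [PySem.List.pyRange_one_cons hlt]
      rw [List.foldl_cons]
      have hk0 : k < xs.length := by omega
      have e1 : PySem.List.pyGetD xs ((k : Int) + 1 - 1) (0, 0) = xs[k] := by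
        have : (k : Int) + 1 - 1 = (k : Int) := by ring
        rw [this, PySem.List.pyGetD_natCast]
        simp [List.getD, hk0]
      have e2 : PySem.List.pyGetD xs ((k : Int) + 1) (0, 0) = xs[k + 1] := by
        have : (k : Int) + 1 = ((k + 1 : Nat) : Int) := by push_cast; ring
        rw [this, PySem.List.pyGetD_natCast]
        simp [List.getD, hk]
      rw [e1, e2]
      have hrec := ih (k + 1) (g init xs[k] xs[k + 1]) (by omega)
      have hcast : ((k + 1 : Nat) : Int) + 1 = (k : Int) + 1 + 1 := by push_cast; ring
      rw [hcast] at hrec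
      rw [hrec]
      have d1 : xs.drop k = xs[k] :: xs.drop (k + 1) := List.drop_eq_getElem_cons hk0
      have d2 : xs.drop (k + 1) = xs[k + 1] :: xs.drop (k + 2) := List.drop_eq_getElem_cons hk
      rw [d1, d2, List.zip_cons_cons, List.foldl_cons, ← d2]
    · have h1 : (xs.length : Int) ≤ (k : Int) + 1 := by exact_mod_cast Nat.not_lt.mp hk
      rw [PySem.List.pyRange_one_eq_nil h1]
      have hd : xs.drop (k + 1) = [] := List.drop_eq_nil_of_le (by omega)
      simp [hd]

def pvFinish (st : List (Int × Int × Int) × Int × Int × Int) : List (Int × Int × Int) :=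
  st.1 ++ [(st.2.1, st.2.2.1, st.2.2.2)]

theorem portA_reduce (sa sb : List Int) (ha : sa ≠ []) :
    find_consecutive_runs sa sb =
      (match PySem.List.pyGet? (PySem.List.sorted2 (sa.zip sb) Prod.fst Prod.snd) 0 with
      | none => []
      | some p0 =>
          pvFinish ((PySem.List.pyRange 1 (((PySem.List.sorted2 (sa.zip sb) Prod.fst Prod.snd).length : Int)) 1).foldl
            (fun st i => pvStepA st
              (PySem.List.pyGetD (PySem.List.sorted2 (sa.zip sb) Prod.fst Prod.snd) (i - 1) (0, 0))
              (PySem.List.pyGetD (PySem.List.sorted2 (sa.zip sb) Prod.fst Prod.snd) i (0, 0)))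
            ([], p0.1, p0.2, 1))) := by
  unfold find_consecutive_runs
  rw [if_neg ha]
  rfl

theorem key_lemma : ∀ (rest : List (Int × Int)) (x y k : Int) (runs : List (Int × Int × Int)) (fuel : Nat),
    rest.length ≤ fuel →
    pvFinish ((((x + k - 1, y + k - 1) :: rest).zip rest).foldl (fun st pq => pvStepA st pq.1 pq.2) (runs, x, y, k))
      = runs ++ (x, y, (pvScan x y k rest).1) :: pvRuns fuel (pvScan x y k rest).2 := by
  intro rest
  induction rest with
  | nil =>
    intro x y k runs fuel _
    cases fuel <;> simp [pvScan, pvRuns, pvFinish]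
  | cons q rest2 ih =>
    intro x y k runs fuel hf
    obtain ⟨a, b⟩ := q
    simp only [List.zip_cons_cons, List.foldl_cons]
    by_cases hq : a = x + k ∧ b = y + k
    · have hcond : a = (x + k - 1) + 1 ∧ b = (y + k - 1) + 1 := by omega
      have hstep : pvStepA (runs, x, y, k) (x + k - 1, y + k - 1) (a, b) = (runs, x, y, k + 1) := by
        simp [pvStepA, hcond.1, hcond.2]
      rw [hstep]
      have hab : (a, b) = (x + (k + 1) - 1, y + (k + 1) - 1) := by
        simp [Prod.ext_iff]; omega
      have hscan : pvScan x y k ((a, b) :: rest2) = pvScan x y (k + 1) rest2 := by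
        simp [pvScan, hq.1, hq.2]
      rw [hscan, hab]
      exact ih x y (k + 1) runs fuel (by simpa using Nat.le_of_succ_le hf)
    · have hcond : ¬ (a = (x + k - 1) + 1 ∧ b = (y + k - 1) + 1) := by omega
      have hstep : pvStepA (runs, x, y, k) (x + k - 1, y + k - 1) (a, b) = (runs ++ [(x, y, k)], a, b, 1) := by
        simp only [pvStepA]
        rw [if_neg hcond]
      rw [hstep]
      have hscan : pvScan x y k ((a, b) :: rest2) = (k, (a, b) :: rest2) := by
        simp only [pvScan]
        rw [if_neg (by simp [Prod.ext_iff]; omega)]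
      rw [hscan]
      cases fuel with
      | zero => simp at hf
      | succ f =>
        have hrec := ih a b 1 (runs ++ [(x, y, k)]) f (by simpa using hf)
        have e1 : a + 1 - 1 = a := by ring
        have e2 : b + 1 - 1 = b := by ring
        rw [e1, e2] at hrec
        simp only [pvRuns]
        rw [hrec]
        simp [List.append_assoc]

-- A on a nonempty zip equals the run-peeling normal form of the sorted pairs
theorem A_eq_runs (sa sb : List Int) (ha : sa ≠ []) (hb : sb ≠ []) :
    find_consecutive_runs sa sb
      = pvRuns (PySem.List.sorted2 (sa.zip sb) Prod.fst Prod.snd).length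
               (PySem.List.sorted2 (sa.zip sb) Prod.fst Prod.snd) := by
  rw [portA_reduce sa sb ha]
  have hz : sa.zip sb ≠ [] := by
    cases sa with
    | nil => exact absurd rfl ha
    | cons u us => cases sb with
      | nil => exact absurd rfl hb
      | cons v vs => simp
  have hpne : PySem.List.sorted2 (sa.zip sb) Prod.fst Prod.snd ≠ [] := by
    intro h
    have hp := PySem.List.sorted2_perm (sa.zip sb) Prod.fst Prod.snd false
    rw [h] at hp
    exact hz hp.symm.eq_nil
  obtain ⟨p0, t, hpt⟩ := List.exists_cons_of_ne_nil hpne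
  obtain ⟨x0, y0⟩ := p0
  rw [hpt]
  have hget : PySem.List.pyGet? ((x0, y0) :: t) 0 = some (x0, y0) := by
    simp [PySem.List.pyGet?, PySem.List.pyIdx?]
  rw [hget]
  have hfold := foldl_idx (β := List (Int × Int × Int) × Int × Int × Int) pvStepA
    ((x0, y0) :: t) ((x0, y0) :: t).length 0 ([], x0, y0, 1) (by simp)
  simp only [Nat.cast_zero, zero_add, List.drop_zero, List.drop_one, List.tail_cons] at hfold
  have hkey := key_lemma t x0 y0 1 [] t.length le_rfl
  have hp0 : ((x0 + 1 - 1 : Int), (y0 + 1 - 1 : Int)) = ((x0, y0) : Int × Int) := by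
    simp
  rw [hp0] at hkey
  simp only
  rw [hfold, hkey]
  simp [pvRuns]

-- ---- B-side: the staged pipeline also peels runs ----
-- structural form of B's start positions: pvAux prev rest i lists, from offset i on,
-- the positions where the offset key changes (= the element is not prev + (1,1))
def pvAux : (Int × Int) → List (Int × Int) → Nat → List Nat
  | _, [], _ => []
  | prev, q :: r, i =>
      if q = (prev.1 + 1, prev.2 + 1) then pvAux q r (i + 1) else i :: pvAux q r (i + 1)

def pvStartsNat : List (Int × Int) → List Nat
  | [] => []
  | p :: rest => 0 :: pvAux p rest 1

-- structural, Nat-indexed form of B's whole pipeline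
def pvBcore (ps : List (Int × Int)) : List (Int × Int × Int) :=
  ((pvStartsNat ps).zip ((pvStartsNat ps).drop 1 ++ [ps.length])).map
    (fun se => ((ps.getD se.1 (0, 0)).1, (ps.getD se.1 (0, 0)).2, ((se.2 : Int) - (se.1 : Int))))

theorem pvAux_shift : ∀ (r : List (Int × Int)) (prev : Int × Int) (j i : Nat),
    pvAux prev r (j + i) = (pvAux prev r j).map (· + i) := by
  intro r
  induction r with
  | nil => intro prev j i; simp [pvAux]
  | cons q r2 ih =>
    intro prev j i
    by_cases hq : q = (prev.1 + 1, prev.2 + 1)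
    · simp only [pvAux, if_pos hq]
      have : j + i + 1 = (j + 1) + i := by omega
      rw [this, ih]
    · simp only [pvAux, if_neg hq, List.map_cons]
      have : j + i + 1 = (j + 1) + i := by omega
      rw [this, ih]

-- peel lemma: the scan finds the first key break, and pvAux after it is a shifted pvStartsNat
theorem pvPeel : ∀ (rest : List (Int × Int)) (x y : Int) (k : Int) (i : Nat),
    (i : Int) = k →
    ∃ m : Nat, m ≤ rest.length ∧ pvScan x y k rest = (k + (m : Int), rest.drop m) ∧
      pvAux (x + k - 1, y + k - 1) rest i = (pvStartsNat (rest.drop m)).map (· + (i + m)) := by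
  intro rest
  induction rest with
  | nil =>
    intro x y k i _
    exact ⟨0, by simp [pvScan, pvAux, pvStartsNat]⟩
  | cons q r ih =>
    intro x y k i hik
    by_cases hq : q = (x + k, y + k)
    · obtain ⟨m, hm, hsc, hax⟩ := ih x y (k + 1) (i + 1) (by push_cast; omega)
      refine ⟨m + 1, by simpa using Nat.succ_le_succ hm, ?_, ?_⟩
      · simp only [pvScan, if_pos hq, hsc, List.drop_succ_cons]
        congr 1
        push_cast; ring
      · have hqe : q = (x + (k + 1) - 1, y + (k + 1) - 1) := by
          rw [hq, Prod.mk.injEq]; constructor <;> ring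
        simp only [pvAux]
        rw [if_pos (by rw [hq, Prod.mk.injEq]; constructor <;> ring)]
        rw [hqe, hax, List.drop_succ_cons]
        have e : i + 1 + m = i + (m + 1) := by omega
        rw [e]
    · refine ⟨0, by simp, by simp [pvScan, if_neg hq], ?_⟩
      have hne : ¬ q = ((x + k - 1) + 1, (y + k - 1) + 1) := by
        intro h; apply hq; rw [h, Prod.mk.injEq]; constructor <;> ring
      simp only [pvAux]
      rw [if_neg hne]
      simp only [List.drop_zero, pvStartsNat, List.map_cons, Nat.zero_add]
      rw [List.cons.injEq]
      refine ⟨by omega, ?_⟩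
      rw [show i + 1 = 1 + (i + 0) by omega, pvAux_shift]

-- main B-side lemma: the structural pipeline equals the run-peeling normal form
theorem pvBcore_eq_runs : ∀ (n : Nat) (ps : List (Int × Int)), ps.length ≤ n →
    pvBcore ps = pvRuns ps.length ps := by
  intro n
  induction n with
  | zero =>
    intro ps h
    have : ps = [] := List.eq_nil_of_length_eq_zero (Nat.le_zero.mp h)
    subst this; simp [pvBcore, pvStartsNat, pvRuns]
  | succ N ih =>
    intro ps hlen
    cases ps with
    | nil => simp [pvBcore, pvStartsNat, pvRuns]
    | cons p rest =>
      obtain ⟨x, y⟩ := p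
      obtain ⟨m, hm, hsc, hax⟩ := pvPeel rest x y 1 1 (by norm_num)
      have hax' : pvAux (x, y) rest 1 = (pvStartsNat (rest.drop m)).map (· + (1 + m)) := by
        have e : ((x : Int) + 1 - 1, (y : Int) + 1 - 1) = ((x, y) : Int × Int) := by
          simp
        rw [← e]; exact hax
      have hstarts : pvStartsNat ((x, y) :: rest) = 0 :: (pvStartsNat (rest.drop m)).map (· + (1 + m)) := by
        simp [pvStartsNat, hax']
      have hrunlen : (rest.drop m).length = rest.length - m := by simp
      -- unfold pvRuns one step
      have hrunsR : pvRuns ((x, y) :: rest).length ((x, y) :: rest)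
          = (x, y, (1 : Int) + (m : Int)) :: pvRuns (rest.drop m).length (rest.drop m) := by
        simp only [List.length_cons, pvRuns, hsc]
        rw [List.cons.injEq]
        exact ⟨rfl, pvRuns_fuel rest.length (rest.drop m) (rest.drop m).length (by simp) le_rfl⟩
      rw [hrunsR]
      have ihd : pvBcore (rest.drop m) = pvRuns (rest.drop m).length (rest.drop m) :=
        ih (rest.drop m) (by simp at hlen ⊢; omega)
      rw [← ihd]
      -- now expand pvBcore (p :: rest) using hstarts
      unfold pvBcore
      rw [hstarts]
      cases hdm : rest.drop m with
      | nil =>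
        have hmlen : m = rest.length := by
          have := congrArg List.length hdm
          simp at this
          omega
        simp only [pvStartsNat, hdm, List.map_nil, List.drop_one, List.tail_cons,
          List.nil_append, List.zip_cons_cons, List.zip_nil_left, List.map_cons, List.map_nil]
        simp [pvBcore, pvStartsNat, hmlen]
        push_cast
        omega
      | cons q r' =>
        -- startsNat (q :: r') = 0 :: pvAux q r' 1  (nonempty)
        have hsn : pvStartsNat (q :: r') = 0 :: pvAux q r' 1 := rfl
        rw [hsn]
        set T := pvAux q r' 1 with hT
        -- LHS starts list: 0 :: (1+m) :: T.map (·+(1+m))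
        simp only [List.map_cons, Nat.zero_add]
        -- compute the zip
        have hzip : ((0 : Nat) :: (1 + m) :: T.map (· + (1 + m))).zip
              ((((0 : Nat) :: (1 + m) :: T.map (· + (1 + m))).drop 1 ++ [((x, y) :: rest).length]))
            = (0, 1 + m) :: (((1 + m) :: T.map (· + (1 + m))).zip
                (T.map (· + (1 + m)) ++ [((x, y) :: rest).length])) := by
          simp
        rw [hzip]
        simp only [List.map_cons]
        rw [List.cons.injEq]
        refine ⟨?_, ?_⟩
        · -- head tuple
          simp [Prod.mk.injEq]
        · -- tail tuples: shifted copy of pvBcore (q :: r')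
          have hlen' : ((x, y) :: rest).length = (q :: r').length + (1 + m) := by
            have := congrArg List.length hdm
            simp at this ⊢
            omega
          have hshift : ((1 + m) :: T.map (· + (1 + m))).zip (T.map (· + (1 + m)) ++ [((x, y) :: rest).length])
              = ((0 :: T).zip (T ++ [(q :: r').length])).map
                  (fun se => (se.1 + (1 + m), se.2 + (1 + m))) := by
            rw [hlen']
            have e0 : ((1 + m) :: T.map (· + (1 + m))) = (0 :: T).map (· + (1 + m)) := by
              simp
            have e1 : T.map (· + (1 + m)) ++ [(q :: r').length + (1 + m)]
                = (T ++ [(q :: r').length]).map (· + (1 + m)) := by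
              simp
            rw [e0, e1, List.zip_map]
            rfl
          rw [hshift, List.map_map]
          -- pvBcore (q :: r') in the same shape
          show _ = ((0 :: T).zip (((0 :: T).drop 1) ++ [(q :: r').length])).map _
          simp only [List.drop_one, List.tail_cons]
          apply List.map_congr_left
          intro se hse
          have hse1 : se.1 ∈ (0 :: T) := List.of_mem_zip hse |>.1
          -- bound: every start position is < (q :: r').length
          have hbound : ∀ s ∈ (0 :: T), s < (q :: r').length := by
            intro s hs
            cases hs with
            | head => simp
            | tail _ hs =>
              -- members of pvAux prev r i lie in [i, i + r.length)
              have haux : ∀ (r : List (Int × Int)) (prev : Int × Int) (i s : Nat),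
                  s ∈ pvAux prev r i → i ≤ s ∧ s < i + r.length := by
                intro r
                induction r with
                | nil => intro prev i s h; simp [pvAux] at h
                | cons w r2 ihr =>
                  intro prev i s h
                  simp only [pvAux] at h
                  split at h
                  · have := ihr w (i + 1) s h
                    simp at this ⊢
                    omega
                  · cases h with
                    | head => simp
                    | tail _ h =>
                      have := ihr w (i + 1) s h
                      simp at this ⊢
                      omega
              have := haux r' q 1 s hs
              simp
              omega
          have hidx : ((x, y) :: rest).getD (se.1 + (1 + m)) (0, 0) = (q :: r').getD se.1 (0, 0) := by
            have hlt := hbound se.1 hse1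
            have h1 : ((x, y) :: rest).getD (se.1 + (1 + m)) (0, 0) = rest.getD (se.1 + m) (0, 0) := by
              have : se.1 + (1 + m) = (se.1 + m) + 1 := by omega
              rw [this]
              simp [List.getD_cons_succ]
            rw [h1, ← hdm, Nat.add_comm se.1 m]
            -- (rest.drop m).getD se.1 = rest.getD (m + se.1)
            simp only [List.getD, List.getElem?_drop]
          simp only [Function.comp]
          rw [hidx]
          simp only [Prod.mk.injEq, true_and]
          push_cast
          omega

-- ---- bridge: the port of B equals the structural pipeline ----
-- the Nat-level break test of B's comprehension
def pvQ (ps : List (Int × Int)) (k : Nat) : Bool :=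
  k == 0 || !(ps.getD k (0, 0) == ((ps.getD (k - 1) (0, 0)).1 + 1, (ps.getD (k - 1) (0, 0)).2 + 1))

theorem pvFilterRange_aux : ∀ (ps : List (Int × Int)) (j i : Nat), 1 ≤ i → i + j = ps.length →
    (List.range' i j).filter (pvQ ps) = pvAux (ps.getD (i - 1) (0, 0)) (ps.drop i) i := by
  intro ps j
  induction j with
  | zero =>
    intro i _ hij
    have : ps.drop i = [] := List.drop_eq_nil_of_le (by omega)
    simp [this, pvAux]
  | succ j ih =>
    intro i hi hij
    have hilt : i < ps.length := by omega
    have hrange : List.range' i (j + 1) = i :: List.range' (i + 1) j := by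
      simp [List.range'_succ]
    have hdrop : ps.drop i = ps.getD i (0, 0) :: ps.drop (i + 1) := by
      rw [List.getD_eq_getElem ps (0,0) hilt]
      exact List.drop_eq_getElem_cons hilt
    rw [hrange, hdrop]
    have hi0 : (i == 0) = false := by simp; omega
    by_cases hc : ps.getD i (0, 0) = ((ps.getD (i - 1) (0, 0)).1 + 1, (ps.getD (i - 1) (0, 0)).2 + 1)
    · have hq : pvQ ps i = false := by
        simp only [pvQ, hi0, Bool.false_or, Bool.not_eq_false', beq_iff_eq]
        exact hc
      rw [List.filter_cons_of_neg (by simp [hq])]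
      simp only [pvAux, if_pos hc]
      have := ih (i + 1) (by omega) (by omega)
      simpa using this
    · have hq : pvQ ps i = true := by
        simp only [pvQ, hi0, Bool.false_or, Bool.not_eq_true', beq_eq_false_iff_ne, ne_eq]
        exact hc
      rw [List.filter_cons_of_pos hq]
      simp only [pvAux, if_neg hc]
      have := ih (i + 1) (by omega) (by omega)
      rw [this]
      simp

theorem pvFilterRange (ps : List (Int × Int)) :
    (List.range ps.length).filter (pvQ ps) = pvStartsNat ps := by
  cases ps with
  | nil => simp [pvStartsNat]
  | cons p rest =>
    have h1 : List.range (p :: rest).length = 0 :: List.range' 1 rest.length := by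
      rw [List.range_eq_range']
      simp [List.range'_succ]
    rw [h1]
    have hq0 : pvQ (p :: rest) 0 = true := by simp [pvQ]
    rw [List.filter_cons_of_pos hq0]
    have := pvFilterRange_aux (p :: rest) rest.length 1 le_rfl (by simp; omega)
    rw [this]
    simp [pvStartsNat]

-- keys[k] as a function of the sorted pairs
theorem pvKeys_getD (ps : List (Int × Int)) (k : Nat) (hk : k < ps.length) :
    ((PySem.List.enumerate ps).map (fun iab => (iab.2.1 - iab.1, iab.2.2 - iab.1))).getD k (0, 0)
      = (ps[k].1 - (k : Int), ps[k].2 - (k : Int)) := by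
  have hlen : k < ((PySem.List.enumerate ps).map
      (fun iab : Int × Int × Int => (iab.2.1 - iab.1, iab.2.2 - iab.1))).length := by
    simp [PySem.List.length_enumerate, hk]
  rw [List.getD_eq_getElem _ _ hlen]
  rw [List.getElem_map]
  rw [PySem.List.getElem_enumerate]
  simp

-- the port of B equals the structural Nat-indexed pipeline of the sorted pairs
theorem B_eq_core (sa sb : List Int) :
    find_consecutive_runs_alt sa sb
      = pvBcore (PySem.List.sorted2 (sa.zip sb) Prod.fst Prod.snd) := by
  unfold find_consecutive_runs_alt
  set ps := PySem.List.sorted2 (sa.zip sb) Prod.fst Prod.snd with hps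
  simp only []
  -- starts of the port = (pvStartsNat ps).map Nat.cast
  have hrange : PySem.List.pyRange 0 (ps.length : Int) 1
      = (List.range ps.length).map (fun k : Nat => (k : Int)) := by
    rw [PySem.List.pyRange_one]
    simp
  have hfilter :
      (PySem.List.pyRange 0 (ps.length : Int) 1).filter
        (fun i => i == 0 || PySem.List.pyGetD
            ((PySem.List.enumerate ps).map (fun iab => (iab.2.1 - iab.1, iab.2.2 - iab.1))) i (0, 0)
          != PySem.List.pyGetD
            ((PySem.List.enumerate ps).map (fun iab => (iab.2.1 - iab.1, iab.2.2 - iab.1))) (i - 1) (0, 0))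
      = (pvStartsNat ps).map (fun k : Nat => (k : Int)) := by
    rw [hrange, List.filter_map]
    rw [← pvFilterRange ps]
    congr 1
    apply List.filter_congr
    intro k hk
    have hklt : k < ps.length := by simpa using List.mem_range.mp hk
    simp only [Function.comp]
    by_cases hk0 : k = 0
    · subst hk0; simp [pvQ]
    · have hk1 : 1 ≤ k := by omega
      have hc0 : ((k : Int) == 0) = false := by simp; omega
      have hn0 : (k == 0) = false := by simp; omega
      have e1 : PySem.List.pyGetD
          ((PySem.List.enumerate ps).map (fun iab => (iab.2.1 - iab.1, iab.2.2 - iab.1))) (k : Int) (0, 0)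
          = (ps[k].1 - (k : Int), ps[k].2 - (k : Int)) := by
        rw [PySem.List.pyGetD_natCast]
        exact pvKeys_getD ps k hklt
      have hk1lt : k - 1 < ps.length := by omega
      have e2 : PySem.List.pyGetD
          ((PySem.List.enumerate ps).map (fun iab => (iab.2.1 - iab.1, iab.2.2 - iab.1))) ((k : Int) - 1) (0, 0)
          = (ps[k - 1].1 - ((k : Int) - 1), ps[k - 1].2 - ((k : Int) - 1)) := by
        have hcast : (k : Int) - 1 = ((k - 1 : Nat) : Int) := by omega
        rw [hcast, PySem.List.pyGetD_natCast, pvKeys_getD ps (k - 1) hk1lt]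
      rw [e1, e2]
      -- both sides are the same break test
      have egetD : ps.getD k (0, 0) = ps[k] := List.getD_eq_getElem ps (0, 0) hklt
      have egetD' : ps.getD (k - 1) (0, 0) = ps[k - 1] := List.getD_eq_getElem ps (0, 0) hk1lt
      simp only [pvQ, hc0, hn0, Bool.false_or, egetD, egetD']
      by_cases hbr : ps[k] = (ps[k - 1].1 + 1, ps[k - 1].2 + 1)
      · have : (ps[k].1 - (k : Int), ps[k].2 - (k : Int))
            = (ps[k - 1].1 - ((k : Int) - 1), ps[k - 1].2 - ((k : Int) - 1)) := by
          rw [hbr, Prod.mk.injEq]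
          omega
        simp [bne, this, hbr]
        omega
      · have : (ps[k].1 - (k : Int), ps[k].2 - (k : Int))
            ≠ (ps[k - 1].1 - ((k : Int) - 1), ps[k - 1].2 - ((k : Int) - 1)) := by
          intro h
          rw [Prod.mk.injEq] at h
          apply hbr
          rw [Prod.mk.injEq]
          omega
        simp [bne, this, hbr]
  rw [hfilter]
  -- assemble: everything is a cast image of the Nat pipeline
  unfold pvBcore
  set S := pvStartsNat ps with hS
  have hends : (S.map (fun k : Nat => (k : Int))).drop 1 ++ [(ps.length : Int)]
      = (S.drop 1 ++ [ps.length]).map (fun k : Nat => (k : Int)) := by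
    simp [List.map_drop]
  rw [hends]
  rw [List.zip_map]
  rw [List.map_map]
  apply List.map_congr_left
  intro se hse
  simp only [Function.comp, Prod.map]
  rw [PySem.List.pyGetD_natCast]

-- sorted2 of the empty list is empty (via the permutation property)
theorem sorted2_nil_int : PySem.List.sorted2 ([] : List (Int × Int)) Prod.fst Prod.snd = [] := by
  have hp := PySem.List.sorted2_perm ([] : List (Int × Int)) Prod.fst Prod.snd false
  exact hp.eq_nil

-- ===== VERDICT (by name: the statements are the Claim_ definitions above) =====
theorem find_consecutive_runs_spec : Claim_equal_find_consecutive_runs := by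
  intro sa sb _ hpre
  unfold Spec_find_consecutive_runs
  rw [B_eq_core]
  by_cases ha : sa = []
  · subst ha
    have hz : (([] : List Int).zip sb) = [] := by simp
    rw [hz, sorted2_nil_int]
    simp [find_consecutive_runs, pvBcore, pvStartsNat]
  · have hb : sb ≠ [] := hpre.resolve_left ha
    rw [A_eq_runs sa sb ha hb]
    exact (pvBcore_eq_runs _ _ le_rfl).symm
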